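-- pv_equiv track=rewrite | github.com/weijun21/Python_analysis_lotterySG | graph_draw_analysis.py | is_unlikely_pattern
-- ===== SOURCE A (Python) =====
-- def is_unlikely_pattern(nums):
--     sorted_nums = sorted(nums)
--     if all(sorted_nums[i] + 1 == sorted_nums[i+1] for i in range(len(sorted_nums)-1)):
--         return True
--     if all(n % 2 == 0 for n in nums) or all(n % 2 == 1 for n in nums):
--         return True
--     if (max(nums) - min(nums)) < 15:
--         return True
--     return False
-- ===== SOURCE B (Python) =====
-- def is_unlikely_pattern(nums):
--     if not nums:
--         return True
--     mx, mn = max(nums), min(nums)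
--     if len(set(nums)) == len(nums) and mx - mn == len(nums) - 1:
--         return True
--     if all(n % 2 == 0 for n in nums) or all(n % 2 == 1 for n in nums):
--         return True
--     return mx - mn < 15
-- ===== Notes on version B (the rewrite author's own statement) =====
-- stated objective: simpler
-- what changed: The sort-based adjacent-pairs consecutiveness scan is replaced by an arithmetic test: a run of consecutive numbers is exactly a duplicate-free list whose max-min span equals len-1, so B checks len(set(nums))==len(nums) and max-min==len-1 and never sorts.
import Mathlib
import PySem

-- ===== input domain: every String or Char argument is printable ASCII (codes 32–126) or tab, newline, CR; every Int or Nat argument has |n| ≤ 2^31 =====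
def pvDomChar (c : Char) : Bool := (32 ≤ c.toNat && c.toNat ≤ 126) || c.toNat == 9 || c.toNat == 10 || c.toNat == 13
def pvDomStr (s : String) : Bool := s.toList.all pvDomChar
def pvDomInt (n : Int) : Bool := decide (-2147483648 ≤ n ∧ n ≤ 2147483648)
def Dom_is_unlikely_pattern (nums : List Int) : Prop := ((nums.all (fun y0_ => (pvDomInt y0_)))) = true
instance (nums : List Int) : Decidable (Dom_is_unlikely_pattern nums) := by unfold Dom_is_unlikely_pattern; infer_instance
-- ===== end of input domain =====

-- B replaces A's sort-and-adjacent-scan consecutiveness test by the arithmetic test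
-- "no duplicates and max - min = len - 1" over set(nums), keeping the parity and range
-- checks unchanged (objective: simpler, no sort).

-- ===== PORT A =====
def is_unlikely_pattern (nums : List Int) : Bool :=
  let sorted_nums := PySem.List.sorted nums (fun x => x) false
  if (PySem.List.pyRange 0 (PySem.List.len sorted_nums - 1) 1).all
       (fun i => PySem.List.pyGetD sorted_nums i 0 + 1 == PySem.List.pyGetD sorted_nums (i + 1) 0) then
    true
  else if nums.all (fun n => PySem.Int.mod n 2 == 0) || nums.all (fun n => PySem.Int.mod n 2 == 1) then
    true
  else
    -- max(nums)/min(nums): only reached with nums ≠ [] (the empty list returns in the first branch)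
    match PySem.List.max? nums (fun x => x), PySem.List.min? nums (fun x => x) with
    | some mx, some mn => decide (mx - mn < 15)
    | _, _ => false

-- ===== PORT B =====
def is_unlikely_pattern_alt (nums : List Int) : Bool :=
  if nums.isEmpty then true
  else
    match PySem.List.max? nums (fun x => x) with
    | none => false  -- unreachable: nums ≠ []
    | some mx =>
      match PySem.List.min? nums (fun x => x) with
      | none => false  -- unreachable: nums ≠ []
      | some mn =>
        if PySem.Set.len (PySem.Set.ofList nums) == PySem.List.len nums
            && mx - mn == PySem.List.len nums - 1 then
          true
        else if nums.all (fun n => PySem.Int.mod n 2 == 0) || nums.all (fun n => PySem.Int.mod n 2 == 1) then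
          true
        else
          decide (mx - mn < 15)

-- ===== PRECONDITION & SPEC =====
def Spec_is_unlikely_pattern (nums : List Int) (out : Bool) : Prop := out = is_unlikely_pattern_alt nums
instance (nums : List Int) (out : Bool) : Decidable (Spec_is_unlikely_pattern nums out) := by unfold Spec_is_unlikely_pattern; infer_instance

-- ===== CLAIM (what is proved, stated in full; the proofs are below) =====
def Claim_equal_is_unlikely_pattern : Prop := ∀ (nums : List Int), Dom_is_unlikely_pattern nums → Spec_is_unlikely_pattern nums (is_unlikely_pattern nums)

-- ===== LEMMAS AND PROOFS =====

theorem pv_foldl_add_sublist {s ys : List Int} (h : s.Sublist ys) :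
    ∀ (xs : List Int), (xs.foldl PySem.Set.add s).Sublist (ys ++ xs) := by
  intro xs
  induction xs generalizing s ys with
  | nil => simpa using h
  | cons x t ih =>
    simp only [List.foldl_cons]
    have h2 : (PySem.Set.add s x).Sublist (ys ++ [x]) := by
      unfold PySem.Set.add
      split
      · exact h.trans (List.sublist_append_left ys [x])
      · exact h.append (List.Sublist.refl [x])
    have := ih h2
    simpa using this

theorem pv_ofList_sublist (xs : List Int) : (PySem.Set.ofList xs).Sublist xs := by
  have := pv_foldl_add_sublist (s := []) (ys := []) (List.Sublist.refl []) xs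
  simpa [PySem.Set.ofList_eq_foldl] using this

theorem pv_foldl_add_fresh (xs : List Int) (hn : xs.Nodup) : ∀ (s : List Int),
    (∀ a ∈ xs, a ∉ s) → xs.foldl PySem.Set.add s = s ++ xs := by
  induction xs with
  | nil => simp
  | cons x t ih =>
    intro s hf
    have hx : x ∉ s := hf x (by simp)
    have hadd : PySem.Set.add s x = s ++ [x] := by
      unfold PySem.Set.add
      simp [hx]
    rw [List.foldl_cons, hadd, ih (List.nodup_cons.mp hn).2 (s ++ [x])]
    · simp
    · intro a ha
      simp only [List.mem_append, List.mem_singleton, not_or]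
      refine ⟨hf a (by simp [ha]), ?_⟩
      rintro rfl
      exact (List.nodup_cons.mp hn).1 ha

theorem pv_ofList_len_iff (xs : List Int) :
    (PySem.Set.ofList xs).length = xs.length ↔ xs.Nodup := by
  constructor
  · intro h
    have := (pv_ofList_sublist xs).eq_of_length h
    rw [← this]
    exact PySem.Set.nodup_ofList xs
  · intro h
    have := pv_foldl_add_fresh xs h [] (by simp)
    rw [PySem.Set.ofList_eq_foldl, this]
    simp

theorem pv_accum (l : List Int) (h : ∀ i : Nat, i + 1 < l.length → l[i]! + 1 ≤ l[(i + 1)]!)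
    (a b : Nat) (hab : a ≤ b) (hb : b < l.length) :
    l[a]! + ((b : Int) - (a : Int)) ≤ l[b]! := by
  induction b with
  | zero =>
    have : a = 0 := by omega
    subst this; simp
  | succ b ih =>
    rcases Nat.lt_or_ge a (b+1) with hlt | hge
    · have h1 := ih (by omega) (by omega)
      have h2 := h b hb
      push_cast
      omega
    · have : a = b + 1 := by omega
      subst this; simp

theorem pv_chain_iff (l : List Int) (hs : l.Pairwise (· ≤ ·)) (hne : l ≠ []) :
    ((∀ i : Nat, i + 1 < l.length → l[i]! + 1 = l[(i + 1)]!) ↔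
      (l.Nodup ∧ l[l.length - 1]! - l[0]! = (l.length : Int) - 1)) := by
  have hlen : 0 < l.length := List.length_pos_iff.mpr hne
  constructor
  · intro hc
    have key : ∀ j : Nat, j < l.length → l[j]! = l[0]! + (j : Int) := by
      intro j
      induction j with
      | zero => simp
      | succ j ih =>
        intro hj
        have h1 := ih (by omega)
        have h2 := hc j (by omega)
        push_cast
        omega
    constructor
    · have : l.Pairwise (· ≠ ·) := by
        rw [List.pairwise_iff_getElem]
        intro i j hi hj hij
        have ki := key i (by omega)
        have kj := key j (by omega)
        rw [getElem!_pos l i hi] at ki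
        rw [getElem!_pos l j hj] at kj
        intro he
        rw [he] at ki
        omega
      exact this
    · have k1 := key (l.length - 1) (by omega)
      have k0 := key 0 (by omega)
      push_cast [Nat.cast_sub hlen] at k1
      omega
  · rintro ⟨hn, harith⟩
    have hn' := List.pairwise_iff_getElem.mp hn
    have hlt : l.Pairwise (· < ·) := by
      rw [List.pairwise_iff_getElem] at *
      intro i j hi hj hij
      exact lt_of_le_of_ne (hs i j hi hj hij) (hn' i j hi hj hij)
    have h1 : ∀ i : Nat, i + 1 < l.length → l[i]! + 1 ≤ l[(i + 1)]! := by
      intro i hi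
      have := List.pairwise_iff_getElem.mp hlt i (i+1) (by omega) hi (by omega)
      rw [getElem!_pos l i (by omega), getElem!_pos l (i+1) hi]
      omega
    intro k hk
    by_contra hne2
    have hk2 : l[k]! + 2 ≤ l[(k+1)]! := by
      have := h1 k hk
      omega
    have A1 := pv_accum l h1 0 k (by omega) (by omega)
    have A2 := pv_accum l h1 (k+1) (l.length - 1) (by omega) (by omega)
    push_cast [Nat.cast_sub hlen] at A1 A2
    omega

theorem pv_main (x : Int) (t : List Int) :
    is_unlikely_pattern (x :: t) = is_unlikely_pattern_alt (x :: t) := by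
  set nums := x :: t with hnums
  have hne : nums ≠ [] := by simp [hnums]
  set l := PySem.List.sorted nums (fun y => y) false with hl
  have hperm : l.Perm nums := PySem.List.sorted_perm nums (fun y => y) false
  have hs : l.Pairwise (· ≤ ·) := PySem.List.sorted_pairwise nums (fun y => y)
  have hlne : l ≠ [] := by
    intro h0
    exact hne ((PySem.List.sorted_eq_nil_iff nums (fun y => y) false).mp h0)
  have hllen : 0 < l.length := List.length_pos_iff.mpr hlne
  have hlen : l.length = nums.length := hperm.length_eq
  obtain ⟨mx, hmx⟩ : ∃ mx, PySem.List.max? nums (fun y => y) = some mx := by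
    cases h : PySem.List.max? nums (fun y => y) with
    | none => exact absurd ((PySem.List.max?_eq_none_iff nums (fun y => y)).mp h) hne
    | some m => exact ⟨m, rfl⟩
  obtain ⟨mn, hmn⟩ : ∃ mn, PySem.List.min? nums (fun y => y) = some mn := by
    cases h : PySem.List.min? nums (fun y => y) with
    | none => exact absurd ((PySem.List.min?_eq_none_iff nums (fun y => y)).mp h) hne
    | some m => exact ⟨m, rfl⟩
  have hmxmem : mx ∈ nums := PySem.List.max?_mem hmx
  have hmxmax : ∀ y ∈ nums, y ≤ mx := PySem.List.max?_isMax hmx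
  have hmnmem : mn ∈ nums := PySem.List.min?_mem hmn
  have hmnmin : ∀ y ∈ nums, mn ≤ y := PySem.List.min?_isMin hmn
  have hs' := List.pairwise_iff_getElem.mp hs
  -- the maximum is the last element of the sorted list, the minimum the first
  have hmx' : l[l.length - 1]! = mx := by
    obtain ⟨j, hj, hje⟩ := List.getElem_of_mem (hperm.mem_iff.mpr hmxmem)
    rw [getElem!_pos l (l.length - 1) (by omega)]
    have h1 : l[l.length - 1] ≤ mx :=
      hmxmax _ (hperm.mem_iff.mp (List.getElem_mem _))
    have h2 : mx ≤ l[l.length - 1] := by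
      rcases Nat.lt_or_ge j (l.length - 1) with hj2 | hj2
      · exact hje ▸ hs' j (l.length - 1) hj (by omega) hj2
      · have hje2 : l[j] = l[l.length - 1] := by congr 1; omega
        rw [← hje, hje2]
    omega
  have hmn' : l[0]! = mn := by
    obtain ⟨j, hj, hje⟩ := List.getElem_of_mem (hperm.mem_iff.mpr hmnmem)
    rw [getElem!_pos l 0 (by omega)]
    have h1 : mn ≤ l[0] := hmnmin _ (hperm.mem_iff.mp (List.getElem_mem _))
    have h2 : l[0] ≤ mn := by
      rcases Nat.eq_zero_or_pos j with hj2 | hj2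
      · have hje2 : l[j] = l[0] := by congr 1
        rw [← hje, hje2]
      · exact hje ▸ hs' 0 j (by omega) hj hj2
    omega
  -- the two consecutiveness tests agree
  have hcond : ((PySem.List.pyRange 0 (PySem.List.len l - 1) 1).all
        (fun i => PySem.List.pyGetD l i 0 + 1 == PySem.List.pyGetD l (i + 1) 0)) =
      ((PySem.Set.len (PySem.Set.ofList nums) == PySem.List.len nums)
        && (mx - mn == PySem.List.len nums - 1)) := by
    rw [Bool.eq_iff_iff]
    rw [List.all_eq_true]
    have hget : ∀ (i : Int), 0 ≤ i → i < (l.length : Int) →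
        PySem.List.pyGetD l i 0 = l[i.toNat]! := by
      intro i h0 hlt
      rw [PySem.List.pyGetD_eq_getElem l 0 h0 hlt, getElem!_pos l i.toNat (by omega)]
    have hA : (∀ i ∈ PySem.List.pyRange 0 (PySem.List.len l - 1) 1,
          (PySem.List.pyGetD l i 0 + 1 == PySem.List.pyGetD l (i + 1) 0) = true) ↔
        (∀ i : Nat, i + 1 < l.length → l[i]! + 1 = l[(i + 1)]!) := by
      constructor
      · intro h i hi
        have hmem : (i : Int) ∈ PySem.List.pyRange 0 (PySem.List.len l - 1) 1 := by
          rw [PySem.List.mem_pyRange_one]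
          simp only [PySem.List.len_eq]
          omega
        have hh := h (i : Int) hmem
        rw [beq_iff_eq, hget (i : Int) (by omega) (by omega),
          hget ((i : Int) + 1) (by omega) (by omega)] at hh
        have e0 : ((i : Int)).toNat = i := by omega
        have e1 : ((i : Int) + 1).toNat = i + 1 := by omega
        rw [e0, e1] at hh
        exact hh
      · intro h i hmem
        rw [PySem.List.mem_pyRange_one] at hmem
        simp only [PySem.List.len_eq] at hmem
        rw [beq_iff_eq, hget i (by omega) (by omega), hget (i + 1) (by omega) (by omega)]
        have e1 : (i + 1).toNat = i.toNat + 1 := by omega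
        rw [e1]
        exact h i.toNat (by omega)
    rw [hA, pv_chain_iff l hs hlne]
    have hnodup : l.Nodup ↔ nums.Nodup := hperm.nodup_iff
    have hset : ((PySem.Set.len (PySem.Set.ofList nums) == PySem.List.len nums)
          && (mx - mn == PySem.List.len nums - 1)) = true ↔
        (nums.Nodup ∧ mx - mn = (nums.length : Int) - 1) := by
      rw [Bool.and_eq_true, beq_iff_eq, beq_iff_eq]
      constructor
      · rintro ⟨h1, h2⟩
        refine ⟨(pv_ofList_len_iff nums).mp ?_, by simpa [PySem.List.len_eq] using h2⟩
        simpa [PySem.Set.len, PySem.List.len_eq] using h1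
      · rintro ⟨h1, h2⟩
        refine ⟨?_, by simpa [PySem.List.len_eq] using h2⟩
        simp [PySem.Set.len, PySem.List.len_eq, (pv_ofList_len_iff nums).mpr h1]
    rw [hset, hmx', hmn', hnodup, hlen]
  -- assemble
  show is_unlikely_pattern nums = is_unlikely_pattern_alt nums
  rw [is_unlikely_pattern, is_unlikely_pattern_alt]
  rw [hnums]
  simp only [← hnums, ← hl, hmx, hmn, hcond]
  rw [show nums.isEmpty = false from rfl]
  simp

-- ===== VERDICT (by name: the statement is the Claim_ definition above) =====
theorem is_unlikely_pattern_spec : Claim_equal_is_unlikely_pattern := by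
  intro nums _
  unfold Spec_is_unlikely_pattern
  cases nums with
  | nil => decide
  | cons x t => exact pv_main x t
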